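-- pv_equiv track=rewrite | github.com/burd5/codewars_python | n_centered_arr.py | is_centered
-- ===== SOURCE A (Python) =====
-- def is_centered(arr: list, n: int) -> bool:
--     i, j = 0, len(arr) - 1
--     s = sum(arr)
--     while i < j and s != n:
--         s -= arr[i]
--         s -= arr[j]
--         i += 1
--         j -= 1
--     return s == n
-- ===== SOURCE B (Python) =====
-- def is_centered(arr: list, n: int) -> bool:
--     # Prefix-sum table, then scan symmetric offsets k: middle slice arr[k:len(arr)-k] sums to n?
--     pre = [0]
--     for x in arr:
--         pre.append(pre[-1] + x)
--     m = len(arr)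
--     for k in range(m // 2 + 1):
--         if pre[m - k] - pre[k] == n:
--             return True
--     return False
-- ===== Notes on version B (the rewrite author's own statement) =====
-- stated objective: alternative
-- what changed: Replaces the incremental two-pointer subtraction loop by a prefix-sum table built once plus a scan over symmetric offsets k checking pre[m-k]-pre[k] == n.
import Mathlib
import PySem

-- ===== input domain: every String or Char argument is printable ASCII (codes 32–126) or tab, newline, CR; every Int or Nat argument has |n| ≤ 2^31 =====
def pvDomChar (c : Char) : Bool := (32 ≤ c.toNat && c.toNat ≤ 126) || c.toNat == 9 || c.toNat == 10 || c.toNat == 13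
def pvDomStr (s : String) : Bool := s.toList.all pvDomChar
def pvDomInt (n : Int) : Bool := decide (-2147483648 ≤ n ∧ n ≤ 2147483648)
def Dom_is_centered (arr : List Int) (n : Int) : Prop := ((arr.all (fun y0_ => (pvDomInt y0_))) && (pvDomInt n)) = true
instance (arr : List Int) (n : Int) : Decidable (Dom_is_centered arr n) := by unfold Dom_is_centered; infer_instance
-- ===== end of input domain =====

-- B replaces A's incremental two-pointer subtraction by a prefix-sum table plus an offset scan (alternative decomposition, same cost).

-- ===== PORT A =====
-- A's while loop; arr[i]/arr[j] are always in range when the loop body runs (0 ≤ i < j ≤ len-1),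
-- so pyGetD with default 0 is exact here.
def isCenteredLoop (arr : List Int) (n : Int) (i j s : Int) : Bool :=
  if i < j ∧ s ≠ n then
    isCenteredLoop arr n (i + 1) (j - 1)
      (s - PySem.List.pyGetD arr i 0 - PySem.List.pyGetD arr j 0)
  else
    s == n
termination_by (j - i).toNat
decreasing_by omega

def is_centered (arr : List Int) (n : Int) : Bool :=
  isCenteredLoop arr n 0 ((arr.length : Int) - 1) (arr.foldl (· + ·) 0)

-- ===== PORT B =====
-- pre[-1] via pyGetD … (-1); pre is never empty, and the scan's indices m-k, k are always in range.
def is_centered_alt (arr : List Int) (n : Int) : Bool :=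
  let pre := arr.foldl (fun p x => p ++ [PySem.List.pyGetD p (-1) 0 + x]) [(0 : Int)]
  let m := arr.length
  (PySem.List.pyRange 0 (PySem.Int.floordiv (m : Int) 2 + 1) 1).any
    (fun k => (PySem.List.pyGetD pre ((m : Int) - k) 0 - PySem.List.pyGetD pre k 0) == n)

-- ===== PRECONDITION & SPEC =====
def Spec_is_centered (arr : List Int) (n : Int) (out : Bool) : Prop := out = is_centered_alt arr n
instance (arr : List Int) (n : Int) (out : Bool) : Decidable (Spec_is_centered arr n out) := by unfold Spec_is_centered; infer_instance

-- ===== CLAIM (what is proved, stated in full; the proofs are below) =====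
def Claim_equal_is_centered : Prop := ∀ (arr : List Int) (n : Int), Dom_is_centered arr n → Spec_is_centered arr n (is_centered arr n)

-- ===== LEMMAS AND PROOFS =====

-- sum of the symmetric middle slice arr[k : len-k]
def midSum (arr : List Int) (k : Nat) : Int :=
  (arr.take (arr.length - k)).sum - (arr.take k).sum

theorem pre_spec (arr : List Int) :
    arr.foldl (fun p x => p ++ [PySem.List.pyGetD p (-1) 0 + x]) [(0 : Int)]
      = (List.range (arr.length + 1)).map (fun i => (arr.take i).sum) := by
  induction arr using List.reverseRecOn with
  | nil => simp
  | append_singleton xs x ih =>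
      rw [List.foldl_append, ih]
      simp only [List.foldl_cons, List.foldl_nil]
      have hlast : PySem.List.pyGetD
          ((List.range (xs.length + 1)).map (fun i => (xs.take i).sum)) (-1) 0
          = (xs.take xs.length).sum := by
        rw [List.range_succ, List.map_append, List.map_singleton]
        exact PySem.List.pyGetD_neg_one_append_singleton _ _ _
      rw [hlast]
      simp only [List.length_append, List.length_singleton]
      rw [List.range_succ (n := xs.length + 1), List.map_append, List.map_singleton]
      congr 1
      · apply List.map_congr_left
        intro i hi
        rw [List.mem_range] at hi
        rw [List.take_append_of_le_length (by omega)]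
      · simp [List.take_of_length_le]

theorem any_congr_mem {α : Type} {l : List α} {p q : α → Bool}
    (h : ∀ a ∈ l, p a = q a) : l.any p = l.any q := by
  induction l with
  | nil => rfl
  | cons x xs ih =>
      simp only [List.any_cons]
      rw [h x (List.mem_cons_self), ih (fun a ha => h a (List.mem_cons_of_mem _ ha))]

theorem B_char (arr : List Int) (n : Int) :
    is_centered_alt arr n
      = (List.range (arr.length / 2 + 1)).any (fun k => midSum arr k == n) := by
  unfold is_centered_alt
  simp only [pre_spec]
  rw [show PySem.Int.floordiv ((arr.length : Int)) 2 = ((arr.length / 2 : Nat) : Int) from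
    PySem.Int.floordiv_natCast arr.length 2]
  rw [show ((arr.length / 2 : Nat) : Int) + 1 = ((arr.length / 2 + 1 : Nat) : Int) by push_cast; ring]
  rw [PySem.List.pyRange_zero_natCast]
  rw [List.any_map]
  apply any_congr_mem
  intro k hk
  rw [List.mem_range] at hk
  have hk2 : k ≤ arr.length := by omega
  simp only [Function.comp_apply]
  rw [show ((arr.length : Int) - (k : Int)) = ((arr.length - k : Nat) : Int) by omega]
  rw [PySem.List.pyGetD_natCast, PySem.List.pyGetD_natCast]
  rw [List.getD_eq_getElem _ _ (by simp only [List.length_map, List.length_range]; omega), List.getD_eq_getElem _ _ (by simp only [List.length_map, List.length_range]; omega)]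
  simp [midSum]

theorem midSum_step (arr : List Int) (k : Nat) (hk : 2 * k + 1 < arr.length) :
    midSum arr k - PySem.List.pyGetD arr (k : Int) 0
        - PySem.List.pyGetD arr ((arr.length : Int) - 1 - (k : Int)) 0
      = midSum arr (k + 1) := by
  rw [PySem.List.pyGetD_natCast]
  rw [show ((arr.length : Int) - 1 - (k : Int)) = ((arr.length - (k + 1) : Nat) : Int) by omega]
  rw [PySem.List.pyGetD_natCast]
  rw [List.getD_eq_getElem _ _ (by omega), List.getD_eq_getElem _ _ (by omega)]
  unfold midSum
  rw [show arr.length - k = (arr.length - (k + 1)) + 1 by omega]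
  rw [List.sum_take_succ _ _ (by omega), List.sum_take_succ _ _ (by omega)]
  ring

theorem A_char (arr : List Int) (n : Int) : ∀ (d k : Nat), k + d = arr.length / 2 →
    isCenteredLoop arr n (k : Int) ((arr.length : Int) - 1 - (k : Int)) (midSum arr k)
      = (List.range' k (d + 1)).any (fun j => midSum arr j == n) := by
  intro d
  induction d with
  | zero =>
      intro k hkd
      rw [isCenteredLoop]
      have hcond : ¬ ((k : Int) < (arr.length : Int) - 1 - (k : Int) ∧ midSum arr k ≠ n) := by
        intro ⟨h, _⟩; omega
      rw [if_neg hcond]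
      simp
  | succ d ih =>
      intro k hkd
      have hk2 : 2 * k + 1 < arr.length := by omega
      rw [isCenteredLoop]
      by_cases hs : midSum arr k = n
      · have hcond : ¬ ((k : Int) < (arr.length : Int) - 1 - (k : Int) ∧ midSum arr k ≠ n) := by
          intro ⟨_, h2⟩; exact h2 hs
        rw [if_neg hcond]
        rw [List.range'_succ]
        simp [hs]
      · have hcond : ((k : Int) < (arr.length : Int) - 1 - (k : Int) ∧ midSum arr k ≠ n) := by
          exact ⟨by omega, hs⟩
        rw [if_pos hcond]
        rw [midSum_step arr k hk2]
        have harg1 : (k : Int) + 1 = ((k + 1 : Nat) : Int) := by push_cast; ring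
        have harg2 : (arr.length : Int) - 1 - (k : Int) - 1
            = (arr.length : Int) - 1 - ((k + 1 : Nat) : Int) := by push_cast; ring
        rw [harg1, harg2]
        rw [ih (k + 1) (by omega)]
        conv_rhs => rw [List.range'_succ]
        simp [hs]

theorem foldl_add_eq_sum (arr : List Int) : arr.foldl (· + ·) 0 = arr.sum := by
  rw [List.sum_eq_foldl]

-- ===== VERDICT (by name: the statement is the Claim_ definition above) =====
theorem is_centered_spec : Claim_equal_is_centered := by
  intro arr n _
  unfold Spec_is_centered
  rw [B_char]
  unfold is_centered
  have h0 : arr.foldl (· + ·) 0 = midSum arr 0 := by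
    rw [foldl_add_eq_sum]; unfold midSum; simp
  rw [h0, List.range_eq_range']
  have h := A_char arr n (arr.length / 2) 0 (by omega)
  simpa using h
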